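-- pv_equiv track=rewrite | github.com/eggduzao/Costa_TfbsPrediction | Code/util/constants.py | getChromList
-- ===== SOURCE A (Python) =====
-- def getChromList(x=True, y=True, reference=[]):
--     """
--     Returns the chromossome list
--       x: Wether the chrX will be present or not.
--       y: Wether the chrY will be present or not.
--       reference: List of dictionaries. The returned chromList will only contain entries that appear on any of these dictionaries.
--     """
--     if(not reference):
--         chromList = ["chr"+str(e) for e in range(1,23)]
--         if(x): chromList.append("chrX")
--         if(y): chromList.append("chrY")
--     else:
--         chromList = []
--         for n in [str(e) for e in range(1,23)] + ["X","Y"]: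
--             appears = False
--             for d in reference:
--                 if("chr"+n in d.keys()):
--                     appears = True
--                     break
--             if(appears): chromList.append("chr"+n)
--     return chromList
-- ===== SOURCE B (Python) =====
-- def getChromList(x=True, y=True, reference=[]):
--     candidates = ["chr%d" % e for e in range(1, 23)] + ["chrX", "chrY"]
--     if not reference:
--         chromList = candidates[:22]
--         if x:
--             chromList.append("chrX")
--         if y:
--             chromList.append("chrY")
--         return chromList
--     keys = set()
--     for d in reference:
--         keys |= d.keys()
--     return [c for c in candidates if c in keys]
-- ===== Notes on version B (the rewrite author's own statement) =====
-- stated objective: idiomatic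
-- what changed: B builds one union set of all reference keys once and then filters the fixed candidate list in a single pass, replacing A's nested per-candidate scan over every dict with its break and flag.
import Mathlib
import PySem

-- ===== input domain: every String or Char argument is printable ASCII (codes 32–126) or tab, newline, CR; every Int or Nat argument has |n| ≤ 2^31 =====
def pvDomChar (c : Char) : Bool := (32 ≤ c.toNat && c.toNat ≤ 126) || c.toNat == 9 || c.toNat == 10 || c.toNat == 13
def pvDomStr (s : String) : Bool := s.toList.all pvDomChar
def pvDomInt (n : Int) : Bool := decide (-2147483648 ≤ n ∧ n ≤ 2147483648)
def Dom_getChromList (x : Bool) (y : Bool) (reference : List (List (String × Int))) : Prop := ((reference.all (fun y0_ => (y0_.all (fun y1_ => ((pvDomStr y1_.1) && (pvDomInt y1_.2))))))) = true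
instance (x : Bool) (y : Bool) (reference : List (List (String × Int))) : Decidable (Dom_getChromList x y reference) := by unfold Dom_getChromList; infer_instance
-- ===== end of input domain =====

-- B builds one union set of all reference keys, then filters the fixed candidate list in a single pass
-- (idiomatic restructuring of A's nested per-candidate scan with break); return values proved equal everywhere.


-- ===== PORT A =====
-- inner 'for d in reference: if "chr"+n in d.keys(): appears = True; break'
def pvAppears (reference : List (List (String × Int))) (key : String) : Bool :=
  match reference with
  | [] => false
  | d :: rest => if (PySem.Dict.keys (PySem.Dict.mk d)).contains key then true else pvAppears rest key

def getChromList (x : Bool) (y : Bool) (reference : List (List (String × Int))) : List String :=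
  if reference = [] then
    let chromList := (PySem.List.pyRange 1 23 1).map (fun e => "chr" ++ PySem.Int.toStr e)
    let chromList := if x then chromList ++ ["chrX"] else chromList
    let chromList := if y then chromList ++ ["chrY"] else chromList
    chromList
  else
    (((PySem.List.pyRange 1 23 1).map (fun e => PySem.Int.toStr e)) ++ ["X", "Y"]).foldl
      (fun chromList n =>
        if pvAppears reference ("chr" ++ n) then chromList ++ ["chr" ++ n] else chromList) []

-- ===== PORT B =====
def getChromList_alt (x : Bool) (y : Bool) (reference : List (List (String × Int))) : List String :=
  let candidates := ((PySem.List.pyRange 1 23 1).map (fun e => "chr" ++ PySem.Int.toStr e)) ++ ["chrX", "chrY"]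
  if reference = [] then
    let chromList := PySem.List.slice candidates none (some 22)
    let chromList := if x then chromList ++ ["chrX"] else chromList
    let chromList := if y then chromList ++ ["chrY"] else chromList
    chromList
  else
    let keys := reference.foldl (fun s d => PySem.Set.union s (PySem.Dict.keys (PySem.Dict.mk d))) PySem.Set.empty
    candidates.filter (fun c => PySem.Set.contains keys c)

-- ===== PRECONDITION & SPEC =====
def Spec_getChromList (x : Bool) (y : Bool) (reference : List (List (String × Int))) (out : List String) : Prop := out = getChromList_alt x y reference
instance (x : Bool) (y : Bool) (reference : List (List (String × Int))) (out : List String) : Decidable (Spec_getChromList x y reference out) := by unfold Spec_getChromList; infer_instance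

-- ===== CLAIM (what is proved, stated in full; the proofs are below) =====
def Claim_equal_getChromList : Prop := ∀ (x : Bool) (y : Bool) (reference : List (List (String × Int))), Dom_getChromList x y reference → Spec_getChromList x y reference (getChromList x y reference)

-- ===== LEMMAS AND PROOFS =====

-- Bool-level: membership in s ∪ l, tested against A's if-with-break step
theorem pvContains_union_step (s0 : PySem.Set String) (l : List String) (key : String) (b : Bool) :
    (PySem.Set.contains (PySem.Set.union s0 l) key || b)
      = (PySem.Set.contains s0 key || (if l.contains key then true else b)) := by
  rw [PySem.Set.union, Bool.eq_iff_iff]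
  by_cases h : l.contains key = true
  · simp [PySem.Set.mem_update, List.mem_of_elem_eq_true h]
  · have h' : key ∉ l := fun hm => h (List.elem_eq_true_of_mem hm)
    simp [h, PySem.Set.mem_update, h']

-- membership in the fold-built union set = A's early-exit scan
theorem pvContains_foldl_union (reference : List (List (String × Int))) (s0 : PySem.Set String) (key : String) :
    PySem.Set.contains (reference.foldl (fun s d => PySem.Set.union s (PySem.Dict.keys (PySem.Dict.mk d))) s0) key
      = (PySem.Set.contains s0 key || pvAppears reference key) := by
  induction reference generalizing s0 with
  | nil => simp [pvAppears]
  | cons d rest ih =>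
    simp only [List.foldl_cons, ih, pvAppears]
    rw [← pvContains_union_step]

theorem getChromList_spec' (x y : Bool) (reference : List (List (String × Int))) :
    getChromList x y reference = getChromList_alt x y reference := by
  unfold getChromList getChromList_alt
  by_cases hr : reference = []
  · subst hr
    cases x <;> cases y <;> rfl
  · simp only [hr, if_false]
    rw [PySem.List.foldl_append_if]
    have hmap : (((PySem.List.pyRange 1 23 1).map (fun e => "chr" ++ PySem.Int.toStr e)) ++ ["chrX", "chrY"])
        = (((PySem.List.pyRange 1 23 1).map (fun e => PySem.Int.toStr e)) ++ ["X", "Y"]).map (fun n => "chr" ++ n) := by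
      simp [List.map_map]
    rw [hmap, List.filter_map]
    simp only [List.nil_append]
    congr 1
    refine List.filter_congr ?_
    intro n _
    simp only [Function.comp_apply]
    rw [pvContains_foldl_union]
    simp [PySem.Set.empty, PySem.Set.contains]

-- ===== VERDICT (by name: the statement is the Claim_ definition above) =====
theorem getChromList_spec : Claim_equal_getChromList := by
  intro x y reference _
  exact getChromList_spec' x y reference
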